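-- pv_equiv track=rewrite | github.com/shahvirb/adventOfCode2017 | day3.py | gen_spiral_commands
-- ===== SOURCE A (Python) =====
-- def gen_spiral_commands(max=100):
--     edge_len = 1
--     for i in range(max):
--         for j in range(edge_len):
--             yield 'R'
--         for j in range(edge_len):
--             yield 'U'
--         edge_len += 1
--         for j in range(edge_len):
--             yield 'L'
--         for j in range(edge_len):
--             yield 'D'
--         edge_len += 1
-- ===== SOURCE B (Python) =====
-- def gen_spiral_commands(max=100):
--     # Single flat loop over run indices: run r goes in direction 'RULD'[r % 4]
--     # and has length r // 2 + 1, replacing A's nested loops and the twice-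
--     # incremented edge_len counter.
--     for r in range(4 * max):
--         d = 'RULD'[r % 4]
--         for _ in range(r // 2 + 1):
--             yield d
-- ===== Notes on version B (the rewrite author's own statement) =====
-- stated objective: simpler
-- what changed: Replaces A's nested loops and its twice-incremented edge_len counter by a single flat loop over run indices, deriving each run's direction and length in closed form from the index.
import Mathlib
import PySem

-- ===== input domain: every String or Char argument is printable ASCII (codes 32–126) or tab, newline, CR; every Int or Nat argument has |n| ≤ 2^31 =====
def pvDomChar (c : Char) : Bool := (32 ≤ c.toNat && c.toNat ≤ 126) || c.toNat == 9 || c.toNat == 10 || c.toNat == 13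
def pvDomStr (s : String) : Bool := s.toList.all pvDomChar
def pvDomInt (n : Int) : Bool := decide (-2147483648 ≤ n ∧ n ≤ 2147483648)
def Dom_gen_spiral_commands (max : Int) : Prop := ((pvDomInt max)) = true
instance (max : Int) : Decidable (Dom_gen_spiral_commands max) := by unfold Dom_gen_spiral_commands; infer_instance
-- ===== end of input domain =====

-- B replaces A's nested loops and twice-incremented edge_len counter by one flat loop
-- over run indices, deriving direction and run length in closed form (objective: simpler).
-- The Python originals are generators; the ports return the list of yielded values.

-- ===== PORT A =====
-- nested loops with a mutable edge_len, incremented twice per outer iteration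
def gen_spiral_commands (max : Int) : List String :=
  (PySem.List.pyRange 0 max 1).foldl
    (fun (st : Int × List String) _ =>
      let edge_len := st.1
      let acc := st.2
      let acc := acc ++ (PySem.List.pyRange 0 edge_len 1).map (fun _ => "R")
      let acc := acc ++ (PySem.List.pyRange 0 edge_len 1).map (fun _ => "U")
      let edge_len := edge_len + 1
      let acc := acc ++ (PySem.List.pyRange 0 edge_len 1).map (fun _ => "L")
      let acc := acc ++ (PySem.List.pyRange 0 edge_len 1).map (fun _ => "D")
      (edge_len + 1, acc))
    (1, []) |>.2

-- ===== PORT B =====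
-- flat loop over run indices r: direction 'RULD'[r % 4], length r // 2 + 1
def gen_spiral_commands_alt (max : Int) : List String :=
  (PySem.List.pyRange 0 (4 * max) 1).foldl
    (fun acc r =>
      -- 'RULD'[r % 4]: 0 ≤ r % 4 < 4, so the index is always in range (none unreachable)
      let d : String := match PySem.Str.pyGet? "RULD" (PySem.Int.mod r 4) with
        | some c => String.ofList [c]
        | none => ""
      acc ++ (PySem.List.pyRange 0 (PySem.Int.floordiv r 2 + 1) 1).map (fun _ => d))
    []

-- ===== PRECONDITION & SPEC =====
def Spec_gen_spiral_commands (max : Int) (out : List String) : Prop := out = gen_spiral_commands_alt max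
instance (max : Int) (out : List String) : Decidable (Spec_gen_spiral_commands max out) := by unfold Spec_gen_spiral_commands; infer_instance

-- ===== CLAIM (what is proved, stated in full; the proofs are below) =====
def Claim_equal_gen_spiral_commands : Prop := ∀ (max : Int), Dom_gen_spiral_commands max → Spec_gen_spiral_commands max (gen_spiral_commands max)

-- ===== LEMMAS AND PROOFS =====

-- common closed form: the spiral after n outer iterations of A (= 4n runs of B)
def pvSpiral : Nat → List String
  | 0 => []
  | n + 1 => pvSpiral n ++ List.replicate (2*n+1) "R" ++ List.replicate (2*n+1) "U"
             ++ List.replicate (2*n+2) "L" ++ List.replicate (2*n+2) "D"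

lemma pv_map_const_range (k : Int) (d : String) :
    (PySem.List.pyRange 0 k 1).map (fun _ => d) = List.replicate k.toNat d := by
  rw [PySem.List.pyRange_one]
  simp [List.map_map, Function.comp_def, List.map_const']

lemma pv_mod4 (n : Int) (j : Int) (h0 : 0 ≤ j) (h4 : j < 4) :
    PySem.Int.mod (4*n + j) 4 = j := by
  rw [PySem.Int.mod_eq_emod_of_pos (by norm_num)]; omega

lemma pv_fd2 (a q : Int) (h1 : 2*q ≤ a) (h2 : a < 2*q + 2) :
    PySem.Int.floordiv a 2 = q := by
  rw [PySem.Int.floordiv_eq_ediv_of_pos (by norm_num)]; omega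

-- A's loop invariant: after n outer iterations, edge_len = 2n+1 and acc = pvSpiral n
lemma pv_A_closed (n : Nat) :
    (PySem.List.pyRange 0 (n : Int) 1).foldl
      (fun (st : Int × List String) _ =>
        let edge_len := st.1
        let acc := st.2
        let acc := acc ++ (PySem.List.pyRange 0 edge_len 1).map (fun _ => "R")
        let acc := acc ++ (PySem.List.pyRange 0 edge_len 1).map (fun _ => "U")
        let edge_len := edge_len + 1
        let acc := acc ++ (PySem.List.pyRange 0 edge_len 1).map (fun _ => "L")
        let acc := acc ++ (PySem.List.pyRange 0 edge_len 1).map (fun _ => "D")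
        (edge_len + 1, acc))
      (1, []) = (2*(n : Int)+1, pvSpiral n) := by
  induction n with
  | zero => simp [PySem.List.pyRange_one_eq_nil, pvSpiral]
  | succ n ih =>
    rw [show ((n+1 : Nat) : Int) = (n : Int) + 1 by push_cast; ring,
        PySem.List.pyRange_one_succ_right (by positivity), List.foldl_append, ih]
    simp only [List.foldl_cons, List.foldl_nil, pv_map_const_range]
    have h1 : (2*(n : Int)+1).toNat = 2*n+1 := by omega
    have h2 : (2*(n : Int)+1+1).toNat = 2*n+2 := by omega
    rw [Prod.mk.injEq, h1, h2]
    exact ⟨by ring, by rw [pvSpiral]⟩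

-- B's four runs 4n, 4n+1, 4n+2, 4n+3 append exactly A's (n+1)-st outer iteration
lemma pv_B_step (n : Nat) (acc : List String) :
    (PySem.List.pyRange (4*(n : Int)) (4*(n : Int)+4) 1).foldl
      (fun acc r =>
        let d : String := match PySem.Str.pyGet? "RULD" (PySem.Int.mod r 4) with
          | some c => String.ofList [c]
          | none => ""
        acc ++ (PySem.List.pyRange 0 (PySem.Int.floordiv r 2 + 1) 1).map (fun _ => d))
      acc
    = acc ++ List.replicate (2*n+1) "R" ++ List.replicate (2*n+1) "U"
        ++ List.replicate (2*n+2) "L" ++ List.replicate (2*n+2) "D" := by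
  rw [PySem.List.pyRange_one_cons (by omega), PySem.List.pyRange_one_cons (by omega),
      PySem.List.pyRange_one_cons (by omega), PySem.List.pyRange_one_cons (by omega),
      PySem.List.pyRange_one_eq_nil (by omega)]
  simp only [List.foldl_cons, List.foldl_nil]
  rw [show (4*(n : Int) + 1 + 1 + 1) = 4*(n : Int) + 3 by ring,
      show (4*(n : Int) + 1 + 1) = 4*(n : Int) + 2 by ring]
  have m0 : PySem.Int.mod (4*(n : Int)) 4 = 0 := by
    rw [show (4*(n : Int)) = 4*(n : Int) + 0 by ring]; exact pv_mod4 n 0 (by omega) (by omega)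
  rw [m0, pv_mod4 n 1 (by omega) (by omega),
      pv_mod4 n 2 (by omega) (by omega), pv_mod4 n 3 (by omega) (by omega)]
  have f0 : PySem.Int.floordiv (4*(n : Int)) 2 = 2*n := pv_fd2 _ _ (by omega) (by omega)
  rw [f0, pv_fd2 (4*(n : Int) + 1) (2*n) (by omega) (by omega),
      pv_fd2 (4*(n : Int) + 2) (2*n+1) (by omega) (by omega),
      pv_fd2 (4*(n : Int) + 3) (2*n+1) (by omega) (by omega)]
  simp only [pv_map_const_range,
      show PySem.Str.pyGet? "RULD" 0 = some 'R' from rfl,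
      show PySem.Str.pyGet? "RULD" 1 = some 'U' from rfl,
      show PySem.Str.pyGet? "RULD" 2 = some 'L' from rfl,
      show PySem.Str.pyGet? "RULD" 3 = some 'D' from rfl]
  have h1 : ((2*n : Nat) : Int).toNat + 1 = 2*n+1 := by omega
  have h2 : ((2*n+1 : Nat) : Int).toNat + 1 = 2*n+2 := by omega
  norm_num [h1, h2]
  rfl

lemma pv_B_closed (n : Nat) :
    gen_spiral_commands_alt (n : Int) = pvSpiral n := by
  induction n with
  | zero => simp [gen_spiral_commands_alt, PySem.List.pyRange_one_eq_nil, pvSpiral]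
  | succ n ih =>
    unfold gen_spiral_commands_alt at *
    rw [show (4 * ((n+1 : Nat) : Int)) = 4*(n : Int) + 4 by push_cast; ring,
        PySem.List.pyRange_one_append 0 (4*(n : Int)) (4*(n : Int)+4) (by omega) (by omega),
        List.foldl_append, show (4*(n : Int)) = 4 * ((n : Nat) : Int) by norm_num, ih,
        pv_B_step]
    rw [pvSpiral]

-- ===== VERDICT (by name: the statement is the Claim_ definition above) =====
theorem gen_spiral_commands_spec : Claim_equal_gen_spiral_commands := by
  intro max _
  unfold Spec_gen_spiral_commands
  by_cases h : 0 ≤ max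
  · have hm : max = ((max.toNat : Nat) : Int) := by omega
    rw [hm, pv_B_closed, gen_spiral_commands, pv_A_closed]
  · rw [gen_spiral_commands, gen_spiral_commands_alt,
        PySem.List.pyRange_one_eq_nil (by omega), PySem.List.pyRange_one_eq_nil (by omega)]
    rfl
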